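-- pv_equiv track=rewrite | github.com/nicklasorte/spectrum-systems | spectrum_systems/modules/runtime/artifact_lineage.py | trace_to_leaves
-- ===== SOURCE A (Python) =====
-- from typing import Any, Dict, FrozenSet, List, Optional, Set, Tuple
--
-- def build_full_lineage_graph(
--     registry: Dict[str, Dict[str, Any]],
-- ) -> Dict[str, List[str]]:
--     """Build adjacency map (parent → [children]) for all artifacts.
--
--     Parameters
--     ----------
--     registry:
--         Mapping of artifact_id → metadata.
--
--     Returns
--     -------
--     Dict[str, List[str]]
--         Keys are artifact IDs; values are lists of child IDs.
--     """
--     graph: Dict[str, List[str]] = {aid: [] for aid in registry}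
--
--     for aid, meta in registry.items():
--         for pid in meta.get("parent_artifact_ids", []):
--             if pid in graph:
--                 graph[pid].append(aid)
--             else:
--                 graph[pid] = [aid]
--
--     return graph
--
-- def trace_to_leaves(
--     artifact_id: str,
--     registry: Dict[str, Dict[str, Any]],
-- ) -> List[str]:
--     """Return all artifacts reachable downstream from *artifact_id*.
--
--     Parameters
--     ----------
--     artifact_id:
--         Starting artifact.
--     registry:
--         All known artifacts.
--
--     Returns
--     -------
--     List[str]
--         Artifact IDs reachable downstream (children/grandchildren…).
--     """
--     graph = build_full_lineage_graph(registry)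
--
--     result: List[str] = []
--     visited: Set[str] = set()
--     queue: List[str] = list(graph.get(artifact_id, []))
--
--     while queue:
--         current = queue.pop(0)
--         if current in visited:
--             continue
--         visited.add(current)
--         result.append(current)
--         queue.extend(graph.get(current, []))
--
--     return result
-- ===== SOURCE B (Python) =====
-- def trace_to_leaves(artifact_id, registry):
--     # reverse adjacency, built without pre-seeding every registry key
--     children = {}
--     for aid, meta in registry.items():
--         for pid in meta.get("parent_artifact_ids", []):
--             children[pid] = children.get(pid, []) + [aid]
--
--     # dedup-at-enqueue BFS: the output list itself is the work list,
--     # scanned by an index; nothing is ever popped or skipped.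
--     out = []
--     seen = set()
--     for c in children.get(artifact_id, []):
--         if c not in seen:
--             seen.add(c)
--             out.append(c)
--     i = 0
--     while i < len(out):
--         for c in children.get(out[i], []):
--             if c not in seen:
--                 seen.add(c)
--                 out.append(c)
--         i += 1
--     return out
-- ===== Notes on version B (the rewrite author's own statement) =====
-- stated objective: alternative
-- what changed: B replaces A's FIFO queue (which holds duplicates and checks/skips visited nodes at dequeue time with pop(0)) by a dedup-at-enqueue BFS in which the duplicate-free output list itself is the work list scanned by an advancing index: nothing is ever popped, no skip branch runs at processing time, and the reverse adjacency map is built without pre-seeding every registry key.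
import Mathlib
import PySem

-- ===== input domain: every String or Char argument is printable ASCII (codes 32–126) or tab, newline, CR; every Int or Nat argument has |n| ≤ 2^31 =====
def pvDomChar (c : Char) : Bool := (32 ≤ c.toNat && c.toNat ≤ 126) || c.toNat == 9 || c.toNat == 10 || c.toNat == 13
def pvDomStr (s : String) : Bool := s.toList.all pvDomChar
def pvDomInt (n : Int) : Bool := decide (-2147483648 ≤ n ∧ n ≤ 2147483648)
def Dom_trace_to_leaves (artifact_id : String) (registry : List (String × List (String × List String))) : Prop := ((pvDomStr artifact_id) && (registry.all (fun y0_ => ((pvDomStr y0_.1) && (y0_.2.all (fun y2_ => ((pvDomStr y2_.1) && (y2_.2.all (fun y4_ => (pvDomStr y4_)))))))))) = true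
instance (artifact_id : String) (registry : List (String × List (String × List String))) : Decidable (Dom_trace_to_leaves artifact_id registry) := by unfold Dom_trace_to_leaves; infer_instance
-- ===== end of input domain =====

-- One line: B does dedup-at-ENQUEUE BFS — the duplicate-free output list is itself the work list
-- scanned by an index (no queue, no pop, no visited-skip at processing time) over a reverse-adjacency
-- map built without pre-seeding; objective: alternative decomposition (no pop, no duplicate queue entries).

-- meta.get("parent_artifact_ids", []) on the meta dict (assoc list)
def pvParents (p : String × List (String × List String)) : List String :=
  (PySem.Dict.mk p.2).getD "parent_artifact_ids" []

-- number of pool members (deduplicated) not yet visited: first component of the BFS termination measure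
def pvUnvisited (pool : List String) (vis : PySem.Set String) : Nat :=
  (pool.dedup.filter (fun x => decide (x ∉ vis))).length

-- visiting a fresh pool member strictly shrinks pvUnvisited (termination of both BFS loops)
lemma pvUnvisited_add_lt (pool : List String) (vis : PySem.Set String) (c : String)
    (hc : c ∈ pool) (hv : c ∉ vis) :
    pvUnvisited pool (PySem.Set.add vis c) < pvUnvisited pool vis := by
  have hsub : List.Sublist (pool.dedup.filter (fun x => decide (x ∉ PySem.Set.add vis c)))
      (pool.dedup.filter (fun x => decide (x ∉ vis))) := by
    refine List.monotone_filter_right _ ?_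
    intro a ha
    simp only [decide_eq_true_eq] at ha ⊢
    intro hm
    exact ha ((PySem.Set.mem_add _ _ _).mpr (Or.inl hm))
  have hle := hsub.length_le
  rcases Nat.lt_or_ge (pvUnvisited pool (PySem.Set.add vis c)) (pvUnvisited pool vis) with h | h
  · exact h
  · exfalso
    have heq : (pool.dedup.filter (fun x => decide (x ∉ PySem.Set.add vis c)))
        = (pool.dedup.filter (fun x => decide (x ∉ vis))) :=
      hsub.eq_of_length (Nat.le_antisymm hle h)
    have hcmem : c ∈ pool.dedup.filter (fun x => decide (x ∉ vis)) := by
      simp [List.mem_filter, List.mem_dedup, hc, hv]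
    rw [← heq] at hcmem
    have := (List.mem_filter.mp hcmem).2
    simp only [decide_eq_true_eq] at this
    exact this ((PySem.Set.mem_add _ _ _).mpr (Or.inr rfl))

-- every child list drawn from a graph lies inside that graph's value pool
lemma pvMem_getD_pool (d : PySem.Dict String (List String)) (c x : String)
    (hx : x ∈ d.getD c ([] : List String)) : x ∈ d.values.flatten := by
  rcases hget : d.get? c with _ | v
  · rw [PySem.Dict.getD_of_get?_eq_none d _ hget] at hx
    cases hx
  · rw [PySem.Dict.getD_of_get?_eq_some d _ hget] at hx
    have hitems := PySem.Dict.mem_items_of_get?_eq_some d hget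
    have hv : v ∈ d.values := by
      have : v ∈ d.items.map Prod.snd := List.mem_map.mpr ⟨(c, v), hitems, rfl⟩
      simpa [PySem.Dict.values] using this
    exact List.mem_flatten.mpr ⟨v, hv, hx⟩

-- ===== PORT A =====
-- graph[pid].append(aid)  /  graph[pid] = [aid]
def pvStepA (aid : String) (g : PySem.Dict String (List String)) (pid : String) :
    PySem.Dict String (List String) :=
  if g.contains pid then g.modify pid [] (fun l => l ++ [aid]) else g.insert pid [aid]

def build_full_lineage_graph (registry : List (String × List (String × List String))) :
    PySem.Dict String (List String) :=
  let g0 := registry.foldl (fun g p => g.insert p.1 ([] : List String)) PySem.Dict.empty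
  registry.foldl (fun g p => (pvParents p).foldl (pvStepA p.1) g) g0

-- A's while-loop: queue.pop(0); skip if visited; else record and extend the queue with the children.
-- pool and the membership hypotheses are proof-only ghosts used for termination; they do not affect the value.
def pvLoopA (g : PySem.Dict String (List String)) (pool : List String)
    (hg : ∀ c x, x ∈ g.getD c ([] : List String) → x ∈ pool)
    (res : List String) (vis : PySem.Set String)
    (queue : List String) (h : ∀ x ∈ queue, x ∈ pool) : List String :=
  match queue with
  | [] => res
  | c :: rest =>
    if hmem : c ∈ vis then
      pvLoopA g pool hg res vis rest (fun x hx => h x (List.mem_cons_of_mem c hx))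
    else
      pvLoopA g pool hg (res ++ [c]) (PySem.Set.add vis c) (rest ++ g.getD c [])
        (fun x hx => (List.mem_append.mp hx).elim
          (fun hx' => h x (List.mem_cons_of_mem c hx')) (fun hx' => hg c x hx'))
termination_by (pvUnvisited pool vis, queue.length)
decreasing_by
  · apply Prod.Lex.right
    simp
  · apply Prod.Lex.left
    exact pvUnvisited_add_lt pool vis c (h c (List.mem_cons_self ..)) hmem

def trace_to_leaves (artifact_id : String)
    (registry : List (String × List (String × List String))) : List String :=
  let graph := build_full_lineage_graph registry
  pvLoopA graph graph.values.flatten (fun c x hx => pvMem_getD_pool graph c x hx)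
    [] [] (graph.getD artifact_id []) (fun x hx => pvMem_getD_pool graph artifact_id x hx)

-- ===== PORT B =====
-- children[pid] = children.get(pid, []) + [aid]
def pvBuildRev (registry : List (String × List (String × List String))) :
    PySem.Dict String (List String) :=
  registry.foldl
    (fun d p => (pvParents p).foldl (fun d pid => d.insert pid (d.getD pid [] ++ [p.1])) d)
    PySem.Dict.empty

-- B's for-loop 'for c in …: if c not in seen: seen.add(c); out.append(c)' —
-- state (seen, out); used once at start and once per processed node.
def pvPush : PySem.Set String × List String → List String → PySem.Set String × List String
  | st, [] => st
  | st, c :: rest =>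
    if c ∈ st.1 then pvPush st rest
    else pvPush (PySem.Set.add st.1 c, st.2 ++ [c]) rest

-- after one pvPush pass: appended elements come from the accumulator or the pool,
-- pvUnvisited never grows, and if it is unchanged nothing was appended
lemma pvPush_spec (pool : List String) :
    ∀ (l : List String) (s : PySem.Set String) (acc : List String),
      (∀ x ∈ l, x ∈ pool) →
      (∀ x ∈ (pvPush (s, acc) l).2, x ∈ acc ∨ x ∈ pool) ∧
      pvUnvisited pool (pvPush (s, acc) l).1 ≤ pvUnvisited pool s ∧
      (pvUnvisited pool (pvPush (s, acc) l).1 = pvUnvisited pool s →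
        (pvPush (s, acc) l).2 = acc) := by
  intro l
  induction l with
  | nil =>
    intro s acc _
    refine ⟨fun x hx => Or.inl hx, le_refl _, fun _ => rfl⟩
  | cons c rest ih =>
    intro s acc hl
    by_cases hmem : c ∈ s
    · have hstep : pvPush (s, acc) (c :: rest) = pvPush (s, acc) rest := by
        simp only [pvPush]; rw [if_pos hmem]
      rw [hstep]
      exact ih s acc (fun x hx => hl x (List.mem_cons_of_mem c hx))
    · have hrec := ih (PySem.Set.add s c) (acc ++ [c])
        (fun x hx => hl x (List.mem_cons_of_mem c hx))
      have hlt : pvUnvisited pool (PySem.Set.add s c) < pvUnvisited pool s :=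
        pvUnvisited_add_lt pool s c (hl c (List.mem_cons_self ..)) hmem
      have hstep : pvPush (s, acc) (c :: rest)
          = pvPush (PySem.Set.add s c, acc ++ [c]) rest := by
        simp only [pvPush]; rw [if_neg hmem]
      rw [hstep]
      refine ⟨fun x hx => ?_, ?_, fun heq => ?_⟩
      · rcases hrec.1 x hx with hx' | hx'
        · rcases List.mem_append.mp hx' with hx'' | hx''
          · exact Or.inl hx''
          · rcases List.mem_singleton.mp hx'' with rfl
            exact Or.inr (hl x (List.mem_cons_self ..))
        · exact Or.inr hx'
      · exact le_trans hrec.2.1 (le_of_lt hlt)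
      · exfalso
        have := le_trans hrec.2.1 (le_of_lt hlt)
        omega

-- B's outer while-loop over the out list, split as processed prefix 'res' ++ pending suffix;
-- out[i] is the head of the pending suffix, appending goes to its end.
-- pool and the membership hypotheses are proof-only ghosts used for termination.
def pvLoopB (g : PySem.Dict String (List String)) (pool : List String)
    (hg : ∀ c x, x ∈ g.getD c ([] : List String) → x ∈ pool)
    (res : List String) (seen : PySem.Set String)
    (pending : List String) (h : ∀ x ∈ pending, x ∈ pool) : List String :=
  match pending with
  | [] => res
  | c :: rest =>
    pvLoopB g pool hg (res ++ [c]) (pvPush (seen, []) (g.getD c [])).1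
      (rest ++ (pvPush (seen, []) (g.getD c [])).2)
      (fun x hx => (List.mem_append.mp hx).elim
        (fun hx' => h x (List.mem_cons_of_mem c hx'))
        (fun hx' => ((pvPush_spec pool (g.getD c []) seen []
          (fun y hy => hg c y hy)).1 x hx').elim
          (fun hx'' => absurd hx'' (List.not_mem_nil)) id))
termination_by (pvUnvisited pool seen, pending.length)
decreasing_by
  have hspec := pvPush_spec pool (g.getD c []) seen [] (fun y hy => hg c y hy)
  rcases Nat.lt_or_ge (pvUnvisited pool (pvPush (seen, []) (g.getD c [])).1)
      (pvUnvisited pool seen) with hlt | hge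
  · exact Prod.Lex.left _ _ hlt
  · have heq : pvUnvisited pool (pvPush (seen, []) (g.getD c [])).1 = pvUnvisited pool seen :=
      Nat.le_antisymm hspec.2.1 hge
    rw [heq, hspec.2.2 heq]
    apply Prod.Lex.right
    simp

def trace_to_leaves_alt (artifact_id : String)
    (registry : List (String × List (String × List String))) : List String :=
  let children := pvBuildRev registry
  let st := pvPush ([], []) (children.getD artifact_id [])
  pvLoopB children children.values.flatten (fun c x hx => pvMem_getD_pool children c x hx)
    [] st.1 st.2
    (fun x hx => ((pvPush_spec children.values.flatten (children.getD artifact_id []) [] []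
      (fun y hy => pvMem_getD_pool children artifact_id y hy)).1 x hx).elim
      (fun hx' => absurd hx' (List.not_mem_nil)) id)

-- ===== PRECONDITION & SPEC =====
def Spec_trace_to_leaves (artifact_id : String) (registry : List (String × List (String × List String))) (out : List String) : Prop := out = trace_to_leaves_alt artifact_id registry
instance (artifact_id : String) (registry : List (String × List (String × List String))) (out : List String) : Decidable (Spec_trace_to_leaves artifact_id registry out) := by unfold Spec_trace_to_leaves; infer_instance

-- ===== CLAIM (what is proved, stated in full; the proofs are below) =====
def Claim_equal_trace_to_leaves : Prop := ∀ (artifact_id : String) (registry : List (String × List (String × List String))), Dom_trace_to_leaves artifact_id registry → Spec_trace_to_leaves artifact_id registry (trace_to_leaves artifact_id registry)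

-- ===== LEMMAS AND PROOFS =====

-- unfolding equations for the WF-recursive loops (proof arguments are irrelevant)
lemma pvLoopA_nil (g : PySem.Dict String (List String)) (pool : List String)
    (hg : ∀ c x, x ∈ g.getD c ([] : List String) → x ∈ pool)
    (res : List String) (vis : PySem.Set String) (h : ∀ x ∈ ([] : List String), x ∈ pool) :
    pvLoopA g pool hg res vis [] h = res := by
  rw [pvLoopA.eq_def]

lemma pvLoopA_cons_mem (g : PySem.Dict String (List String)) (pool : List String)
    (hg : ∀ c x, x ∈ g.getD c ([] : List String) → x ∈ pool)
    (res : List String) (vis : PySem.Set String) (c : String) (q : List String)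
    (h : ∀ x ∈ c :: q, x ∈ pool) (hmem : c ∈ vis) :
    pvLoopA g pool hg res vis (c :: q) h
      = pvLoopA g pool hg res vis q (fun x hx => h x (List.mem_cons_of_mem c hx)) := by
  rw [pvLoopA.eq_def]
  dsimp only
  rw [dif_pos hmem]

lemma pvLoopA_cons_not_mem (g : PySem.Dict String (List String)) (pool : List String)
    (hg : ∀ c x, x ∈ g.getD c ([] : List String) → x ∈ pool)
    (res : List String) (vis : PySem.Set String) (c : String) (q : List String)
    (h : ∀ x ∈ c :: q, x ∈ pool) (hmem : ¬ c ∈ vis) :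
    pvLoopA g pool hg res vis (c :: q) h
      = pvLoopA g pool hg (res ++ [c]) (PySem.Set.add vis c) (q ++ g.getD c [])
        (fun x hx => (List.mem_append.mp hx).elim
          (fun hx' => h x (List.mem_cons_of_mem c hx')) (fun hx' => hg c x hx')) := by
  rw [pvLoopA.eq_def]
  dsimp only
  rw [dif_neg hmem]

lemma pvLoopB_nil (g : PySem.Dict String (List String)) (pool : List String)
    (hg : ∀ c x, x ∈ g.getD c ([] : List String) → x ∈ pool)
    (res : List String) (seen : PySem.Set String) (h : ∀ x ∈ ([] : List String), x ∈ pool) :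
    pvLoopB g pool hg res seen [] h = res := by
  rw [pvLoopB.eq_def]

lemma pvLoopB_cons (g : PySem.Dict String (List String)) (pool : List String)
    (hg : ∀ c x, x ∈ g.getD c ([] : List String) → x ∈ pool)
    (res : List String) (seen : PySem.Set String) (c : String) (q : List String)
    (h : ∀ x ∈ c :: q, x ∈ pool) :
    pvLoopB g pool hg res seen (c :: q) h
      = pvLoopB g pool hg (res ++ [c]) (pvPush (seen, []) (g.getD c [])).1
          (q ++ (pvPush (seen, []) (g.getD c [])).2)
          (fun x hx => (List.mem_append.mp hx).elim
            (fun hx' => h x (List.mem_cons_of_mem c hx'))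
            (fun hx' => ((pvPush_spec pool (g.getD c []) seen []
              (fun y hy => hg c y hy)).1 x hx').elim
              (fun hx'' => absurd hx'' (List.not_mem_nil)) id)) := by
  rw [pvLoopB.eq_def]

-- the loops are congruences in their data arguments; proof arguments never matter
lemma pvLoopA_congr (g : PySem.Dict String (List String)) (pool : List String)
    (hg : ∀ c x, x ∈ g.getD c ([] : List String) → x ∈ pool)
    (res₁ res₂ : List String) (vis₁ vis₂ : PySem.Set String) (q₁ q₂ : List String)
    (h₁ : ∀ x ∈ q₁, x ∈ pool) (h₂ : ∀ x ∈ q₂, x ∈ pool)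
    (hres : res₁ = res₂) (hvis : vis₁ = vis₂) (hq : q₁ = q₂) :
    pvLoopA g pool hg res₁ vis₁ q₁ h₁ = pvLoopA g pool hg res₂ vis₂ q₂ h₂ := by
  subst hres hvis hq; rfl

lemma pvLoopB_congr (g : PySem.Dict String (List String)) (pool : List String)
    (hg : ∀ c x, x ∈ g.getD c ([] : List String) → x ∈ pool)
    (res₁ res₂ : List String) (s₁ s₂ : PySem.Set String) (q₁ q₂ : List String)
    (h₁ : ∀ x ∈ q₁, x ∈ pool) (h₂ : ∀ x ∈ q₂, x ∈ pool)
    (hres : res₁ = res₂) (hs : s₁ = s₂) (hq : q₁ = q₂) :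
    pvLoopB g pool hg res₁ s₁ q₁ h₁ = pvLoopB g pool hg res₂ s₂ q₂ h₂ := by
  subst hres hs hq; rfl

-- shifting the out accumulator out of pvPush
lemma pvPush_acc :
    ∀ (l : List String) (s : PySem.Set String) (acc : List String),
      pvPush (s, acc) l = ((pvPush (s, []) l).1, acc ++ (pvPush (s, []) l).2) := by
  intro l
  induction l with
  | nil => intro s acc; simp [pvPush]
  | cons c rest ih =>
    intro s acc
    by_cases hmem : c ∈ s
    · have h1 : pvPush (s, acc) (c :: rest) = pvPush (s, acc) rest := by
        simp only [pvPush]; rw [if_pos hmem]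
      have h2 : pvPush (s, ([] : List String)) (c :: rest) = pvPush (s, []) rest := by
        simp only [pvPush]; rw [if_pos hmem]
      rw [h1, h2, ih s acc]
    · have h1 : pvPush (s, acc) (c :: rest) = pvPush (PySem.Set.add s c, acc ++ [c]) rest := by
        simp only [pvPush]; rw [if_neg hmem]
      have h2 : pvPush (s, ([] : List String)) (c :: rest)
          = pvPush (PySem.Set.add s c, [c]) rest := by
        simp only [pvPush]; rw [if_neg hmem]; rw [List.nil_append]
      rw [h1, h2, ih (PySem.Set.add s c) (acc ++ [c]), ih (PySem.Set.add s c) [c]]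
      simp [List.append_assoc]

-- pvPush distributes over append
lemma pvPush_append (a b : List String) (st : PySem.Set String × List String) :
    pvPush st (a ++ b) = pvPush (pvPush st a) b := by
  induction a generalizing st with
  | nil => rfl
  | cons c rest ih =>
    by_cases hmem : c ∈ st.1
    · simp only [List.cons_append, pvPush, if_pos hmem]
      exact ih st
    · simp only [List.cons_append, pvPush, if_neg hmem]
      exact ih _

-- THE BRIDGE: A's dedup-at-dequeue queue loop equals B's dedup-at-enqueue index loop
lemma pvLoopA_eq_pvLoopB (g : PySem.Dict String (List String)) (pool : List String)
    (hg : ∀ c x, x ∈ g.getD c ([] : List String) → x ∈ pool) :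
    ∀ (res : List String) (vis : PySem.Set String) (q : List String)
      (h : ∀ x ∈ q, x ∈ pool)
      (h' : ∀ x ∈ (pvPush (vis, []) q).2, x ∈ pool),
      pvLoopA g pool hg res vis q h
        = pvLoopB g pool hg res (pvPush (vis, []) q).1 (pvPush (vis, []) q).2 h' := by
  intro res vis q h
  induction res, vis, q, h using pvLoopA.induct g pool hg with
  | case1 res vis h =>
    intro h'
    rw [pvLoopA_nil]
    exact (pvLoopB_nil g pool hg res vis (fun x hx => absurd hx (List.not_mem_nil))).symm
  | case2 res vis c rest h hmem _ ih =>
    intro h'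
    have hps : pvPush (vis, ([] : List String)) (c :: rest) = pvPush (vis, []) rest := by
      simp only [pvPush]; rw [if_pos hmem]
    have h'' : ∀ x ∈ (pvPush (vis, ([] : List String)) rest).2, x ∈ pool := by
      intro x hx; exact h' x (by rw [hps]; exact hx)
    calc pvLoopA g pool hg res vis (c :: rest) h
        = pvLoopA g pool hg res vis rest _ :=
          pvLoopA_cons_mem g pool hg res vis c rest h hmem
      _ = pvLoopB g pool hg res (pvPush (vis, []) rest).1 (pvPush (vis, []) rest).2 h'' := ih h''
      _ = pvLoopB g pool hg res (pvPush (vis, []) (c :: rest)).1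
            (pvPush (vis, []) (c :: rest)).2 h' :=
          pvLoopB_congr g pool hg _ _ _ _ _ _ h'' h' rfl
            (by rw [hps]) (by rw [hps])
  | case3 res vis c rest h hmem _ ih =>
    intro h'
    -- abbreviations: P = push of rest after adding c; N = push of c's children after that
    have hps : pvPush (vis, ([] : List String)) (c :: rest)
        = ((pvPush (PySem.Set.add vis c, []) rest).1,
           c :: (pvPush (PySem.Set.add vis c, []) rest).2) := by
      have : pvPush (vis, ([] : List String)) (c :: rest)
          = pvPush (PySem.Set.add vis c, [c]) rest := by
        simp only [pvPush]; rw [if_neg hmem]; rw [List.nil_append]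
      rw [this, pvPush_acc rest (PySem.Set.add vis c) [c]]
      rfl
    have hsplit : pvPush (PySem.Set.add vis c, ([] : List String)) (rest ++ g.getD c [])
        = ((pvPush ((pvPush (PySem.Set.add vis c, []) rest).1, []) (g.getD c [])).1,
           (pvPush (PySem.Set.add vis c, []) rest).2 ++
             (pvPush ((pvPush (PySem.Set.add vis c, []) rest).1, []) (g.getD c [])).2) := by
      rw [pvPush_append rest (g.getD c []) (PySem.Set.add vis c, [])]
      have : pvPush (PySem.Set.add vis c, ([] : List String)) rest
          = ((pvPush (PySem.Set.add vis c, []) rest).1,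
             (pvPush (PySem.Set.add vis c, []) rest).2) := rfl
      rw [this, pvPush_acc (g.getD c [])]
    have hpool : ∀ x ∈ (pvPush (PySem.Set.add vis c, ([] : List String)) (rest ++ g.getD c [])).2,
        x ∈ pool := by
      intro x hx
      refine ((pvPush_spec pool (rest ++ g.getD c []) (PySem.Set.add vis c) []
        (fun y hy => ?_)).1 x hx).elim (fun hx' => absurd hx' (List.not_mem_nil)) id
      rcases List.mem_append.mp hy with hy' | hy'
      · exact h y (List.mem_cons_of_mem c hy')
      · exact hg c y hy'
    have hpool2 : ∀ x ∈ (pvPush (PySem.Set.add vis c, []) rest).2 ++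
        (pvPush ((pvPush (PySem.Set.add vis c, []) rest).1, []) (g.getD c [])).2, x ∈ pool := by
      intro x hx; exact hpool x (by rw [hsplit]; exact hx)
    calc pvLoopA g pool hg res vis (c :: rest) h
        = pvLoopA g pool hg (res ++ [c]) (PySem.Set.add vis c) (rest ++ g.getD c []) _ :=
          pvLoopA_cons_not_mem g pool hg res vis c rest h hmem
      _ = pvLoopB g pool hg (res ++ [c])
            (pvPush (PySem.Set.add vis c, []) (rest ++ g.getD c [])).1
            (pvPush (PySem.Set.add vis c, []) (rest ++ g.getD c [])).2 hpool := ih hpool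
      _ = pvLoopB g pool hg (res ++ [c])
            (pvPush ((pvPush (PySem.Set.add vis c, []) rest).1, []) (g.getD c [])).1
            ((pvPush (PySem.Set.add vis c, []) rest).2 ++
              (pvPush ((pvPush (PySem.Set.add vis c, []) rest).1, []) (g.getD c [])).2) hpool2 :=
          pvLoopB_congr g pool hg _ _ _ _ _ _ hpool hpool2 rfl
            (by rw [hsplit]) (by rw [hsplit])
      _ = pvLoopB g pool hg res (pvPush (PySem.Set.add vis c, []) rest).1
            (c :: (pvPush (PySem.Set.add vis c, []) rest).2)
            (fun x hx => (List.mem_cons.mp hx).elim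
              (fun hxeq => by rw [hxeq]; exact h c (List.mem_cons_self ..))
              (fun hx' => hpool2 x (List.mem_append_left _ hx'))) :=
          (pvLoopB_cons g pool hg res (pvPush (PySem.Set.add vis c, []) rest).1 c
            (pvPush (PySem.Set.add vis c, []) rest).2 _).symm
      _ = pvLoopB g pool hg res (pvPush (vis, []) (c :: rest)).1
            (pvPush (vis, []) (c :: rest)).2 h' :=
          pvLoopB_congr g pool hg _ _ _ _ _ _ _ h' rfl
            (by rw [hps]) (by rw [hps])

-- the two graph builders agree on every child-list lookup
lemma pvStep_getD (aid pid : String) (d₁ d₂ : PySem.Dict String (List String))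
    (hinv : ∀ c, d₁.getD c ([] : List String) = d₂.getD c ([] : List String)) (c : String) :
    (pvStepA aid d₁ pid).getD c ([] : List String)
      = (d₂.insert pid (d₂.getD pid [] ++ [aid])).getD c ([] : List String) := by
  unfold pvStepA
  by_cases hcon : d₁.contains pid
  · rw [if_pos hcon, PySem.Dict.getD_modify, PySem.Dict.getD_insert]
    by_cases hc : c = pid
    · simp [hc, hinv pid]
    · simp [hc, hinv c]
  · rw [if_neg hcon, PySem.Dict.getD_insert, PySem.Dict.getD_insert]
    by_cases hc : c = pid
    · have hfalse : d₁.contains pid = false := by simpa using hcon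
      have : d₁.getD pid ([] : List String) = [] :=
        PySem.Dict.getD_of_not_contains d₁ _ hfalse
      simp [hc, ← hinv pid, this]
    · simp [hc, hinv c]

lemma pvInner_getD (aid : String) (ps : List String) :
    ∀ (d₁ d₂ : PySem.Dict String (List String)),
      (∀ c, d₁.getD c ([] : List String) = d₂.getD c ([] : List String)) →
      ∀ c, (ps.foldl (pvStepA aid) d₁).getD c ([] : List String)
        = (ps.foldl (fun d pid => d.insert pid (d.getD pid [] ++ [aid])) d₂).getD c ([] : List String) := by
  induction ps with
  | nil => intro d₁ d₂ hinv c; exact hinv c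
  | cons pid rest ih =>
    intro d₁ d₂ hinv c
    exact ih (pvStepA aid d₁ pid) (d₂.insert pid (d₂.getD pid [] ++ [aid]))
      (fun c' => pvStep_getD aid pid d₁ d₂ hinv c') c

lemma pvOuter_getD (registry : List (String × List (String × List String))) :
    ∀ (d₁ d₂ : PySem.Dict String (List String)),
      (∀ c, d₁.getD c ([] : List String) = d₂.getD c ([] : List String)) →
      ∀ c, (registry.foldl (fun g p => (pvParents p).foldl (pvStepA p.1) g) d₁).getD c ([] : List String)
        = (registry.foldl
            (fun d p => (pvParents p).foldl (fun d pid => d.insert pid (d.getD pid [] ++ [p.1])) d)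
            d₂).getD c ([] : List String) := by
  induction registry with
  | nil => intro d₁ d₂ hinv c; exact hinv c
  | cons p rest ih =>
    intro d₁ d₂ hinv c
    exact ih _ _ (fun c' => pvInner_getD p.1 (pvParents p) d₁ d₂ hinv c') c

lemma pvSeed_getD (registry : List (String × List (String × List String))) :
    ∀ (d : PySem.Dict String (List String)), (∀ c, d.getD c ([] : List String) = []) →
      ∀ c, (registry.foldl (fun g p => g.insert p.1 ([] : List String)) d).getD c ([] : List String) = [] := by
  induction registry with
  | nil => intro d hd c; exact hd c
  | cons p rest ih =>
    intro d hd c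
    refine ih _ (fun c' => ?_) c
    rw [PySem.Dict.getD_insert]
    by_cases hc : c' = p.1 <;> simp [hc, hd c']

lemma pvGraphs_getD (registry : List (String × List (String × List String))) (c : String) :
    (build_full_lineage_graph registry).getD c ([] : List String)
      = (pvBuildRev registry).getD c ([] : List String) := by
  unfold build_full_lineage_graph pvBuildRev
  exact pvOuter_getD registry _ PySem.Dict.empty
    (pvSeed_getD registry PySem.Dict.empty (fun c' => PySem.Dict.getD_empty ..)) c

-- pvLoopA's value does not depend on the graph beyond its child-list lookups, nor on the ghost pool
lemma pvLoopA_graph_congr (g₁ g₂ : PySem.Dict String (List String)) (p₁ p₂ : List String)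
    (hg₁ : ∀ c x, x ∈ g₁.getD c ([] : List String) → x ∈ p₁)
    (hg₂ : ∀ c x, x ∈ g₂.getD c ([] : List String) → x ∈ p₂)
    (hgd : ∀ c, g₁.getD c ([] : List String) = g₂.getD c ([] : List String)) :
    ∀ (res : List String) (vis : PySem.Set String) (q : List String)
      (h₁ : ∀ x ∈ q, x ∈ p₁) (h₂ : ∀ x ∈ q, x ∈ p₂),
      pvLoopA g₁ p₁ hg₁ res vis q h₁ = pvLoopA g₂ p₂ hg₂ res vis q h₂ := by
  intro res vis q h₁
  induction res, vis, q, h₁ using pvLoopA.induct g₁ p₁ hg₁ with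
  | case1 res vis h =>
    intro h₂
    exact (pvLoopA_nil g₁ p₁ hg₁ res vis h).trans (pvLoopA_nil g₂ p₂ hg₂ res vis h₂).symm
  | case2 res vis c rest h hmem _ ih =>
    intro h₂
    calc pvLoopA g₁ p₁ hg₁ res vis (c :: rest) h
        = pvLoopA g₁ p₁ hg₁ res vis rest _ :=
          pvLoopA_cons_mem g₁ p₁ hg₁ res vis c rest h hmem
      _ = pvLoopA g₂ p₂ hg₂ res vis rest (fun x hx => h₂ x (List.mem_cons_of_mem c hx)) := ih _
      _ = pvLoopA g₂ p₂ hg₂ res vis (c :: rest) h₂ :=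
          (pvLoopA_cons_mem g₂ p₂ hg₂ res vis c rest h₂ hmem).symm
  | case3 res vis c rest h hmem _ ih =>
    intro h₂
    have h₂' : ∀ x ∈ rest ++ g₁.getD c [], x ∈ p₂ := by
      intro x hx
      rcases List.mem_append.mp hx with hx' | hx'
      · exact h₂ x (List.mem_cons_of_mem c hx')
      · exact hg₂ c x (hgd c ▸ hx')
    calc pvLoopA g₁ p₁ hg₁ res vis (c :: rest) h
        = pvLoopA g₁ p₁ hg₁ (res ++ [c]) (PySem.Set.add vis c) (rest ++ g₁.getD c []) _ :=
          pvLoopA_cons_not_mem g₁ p₁ hg₁ res vis c rest h hmem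
      _ = pvLoopA g₂ p₂ hg₂ (res ++ [c]) (PySem.Set.add vis c) (rest ++ g₁.getD c []) h₂' := ih h₂'
      _ = pvLoopA g₂ p₂ hg₂ (res ++ [c]) (PySem.Set.add vis c) (rest ++ g₂.getD c []) _ :=
          pvLoopA_congr g₂ p₂ hg₂ _ _ _ _ _ _ h₂' _ rfl rfl (by rw [hgd c])
      _ = pvLoopA g₂ p₂ hg₂ res vis (c :: rest) h₂ :=
          (pvLoopA_cons_not_mem g₂ p₂ hg₂ res vis c rest h₂ hmem).symm

-- ===== VERDICT (by name: the statement is the Claim_ definition above) =====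
theorem trace_to_leaves_spec : Claim_equal_trace_to_leaves := by
  intro artifact_id registry _
  unfold Spec_trace_to_leaves trace_to_leaves trace_to_leaves_alt
  have hgd := pvGraphs_getD registry
  have hq₂ : ∀ x ∈ (build_full_lineage_graph registry).getD artifact_id [],
      x ∈ (pvBuildRev registry).values.flatten :=
    fun x hx => pvMem_getD_pool (pvBuildRev registry) artifact_id x (hgd artifact_id ▸ hx)
  have hq₃ : ∀ x ∈ (pvBuildRev registry).getD artifact_id [],
      x ∈ (pvBuildRev registry).values.flatten :=
    fun x hx => pvMem_getD_pool (pvBuildRev registry) artifact_id x hx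
  have hq₄ : ∀ x ∈ (pvPush ([], []) ((pvBuildRev registry).getD artifact_id [])).2,
      x ∈ (pvBuildRev registry).values.flatten := by
    intro x hx
    exact ((pvPush_spec (pvBuildRev registry).values.flatten
      ((pvBuildRev registry).getD artifact_id []) [] [] hq₃).1 x hx).elim
      (fun hx' => absurd hx' (List.not_mem_nil)) id
  calc pvLoopA (build_full_lineage_graph registry)
        (build_full_lineage_graph registry).values.flatten
        (fun c x hx => pvMem_getD_pool (build_full_lineage_graph registry) c x hx)
        [] [] ((build_full_lineage_graph registry).getD artifact_id [])
        (fun x hx => pvMem_getD_pool (build_full_lineage_graph registry) artifact_id x hx)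
      = pvLoopA (pvBuildRev registry) (pvBuildRev registry).values.flatten
          (fun c x hx => pvMem_getD_pool (pvBuildRev registry) c x hx)
          [] [] ((build_full_lineage_graph registry).getD artifact_id []) hq₂ :=
        pvLoopA_graph_congr _ _ _ _ _ _ hgd [] [] _ _ hq₂
    _ = pvLoopA (pvBuildRev registry) (pvBuildRev registry).values.flatten
          (fun c x hx => pvMem_getD_pool (pvBuildRev registry) c x hx)
          [] [] ((pvBuildRev registry).getD artifact_id []) hq₃ :=
        pvLoopA_congr _ _ _ _ _ _ _ _ _ hq₂ hq₃ rfl rfl (hgd artifact_id)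
    _ = pvLoopB (pvBuildRev registry) (pvBuildRev registry).values.flatten
          (fun c x hx => pvMem_getD_pool (pvBuildRev registry) c x hx)
          [] (pvPush ([], []) ((pvBuildRev registry).getD artifact_id [])).1
          (pvPush ([], []) ((pvBuildRev registry).getD artifact_id [])).2 hq₄ :=
        pvLoopA_eq_pvLoopB _ _ _ [] [] _ hq₃ hq₄
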